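-- pv_equiv track=rewrite | github.com/rushingwater13/PDN_Project6 | Problem_1/find_longest_words_MRJob.py | combiner
-- ===== SOURCE A (Python) =====
-- def combiner(letter, words):
--     # find the longest length
--     words = list(words)
--     maxLength = 0
--     for word in words:
--         if len(word) > maxLength:
--             maxLength = len(word)
--
--     # find the words with that longest length
--     for word in words:
--          if len(word) == maxLength:
--             yield letter, word
-- ===== SOURCE B (Python) =====
-- def combiner(letter, words):
--     # single pass: maintain the current maximum length and the buffer of words that attain it
--     maxLength = 0
--     buffer = []
--     for word in words:
--         if len(word) > maxLength:
--             maxLength = len(word)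
--             buffer = [word]
--         elif len(word) == maxLength:
--             buffer.append(word)
--     for word in buffer:
--         yield letter, word
-- ===== Notes on version B (the rewrite author's own statement) =====
-- stated objective: alternative
-- what changed: Replaces A's two scans (find the max length, then re-scan to filter) with one scan that maintains the running max together with the buffer of words attaining it.
import Mathlib
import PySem

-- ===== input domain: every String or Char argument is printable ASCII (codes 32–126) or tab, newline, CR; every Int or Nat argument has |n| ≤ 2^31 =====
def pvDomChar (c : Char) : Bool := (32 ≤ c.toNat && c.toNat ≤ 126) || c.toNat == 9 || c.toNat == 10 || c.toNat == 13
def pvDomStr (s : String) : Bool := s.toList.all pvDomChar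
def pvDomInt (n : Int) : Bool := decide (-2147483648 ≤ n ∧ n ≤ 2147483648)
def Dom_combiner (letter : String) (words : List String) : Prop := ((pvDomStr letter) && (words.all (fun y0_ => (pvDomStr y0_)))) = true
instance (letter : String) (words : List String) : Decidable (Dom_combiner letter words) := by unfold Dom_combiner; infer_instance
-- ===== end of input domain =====

-- B replaces A's two scans (max length, then filter) by one scan maintaining the running max and the buffer of words attaining it (alternative decomposition, same cost).


-- ===== PORT A =====
-- A: first pass computes the maximum length, second pass yields the words of that length.
def combiner (letter : String) (words : List String) : List (String × String) :=
  let maxLength := words.foldl (fun m w => if PySem.Str.len w > m then PySem.Str.len w else m) 0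
  words.foldl (fun acc w => if PySem.Str.len w = maxLength then acc ++ [(letter, w)] else acc) []

-- ===== PORT B =====
-- B: one pass maintaining the running max length together with the buffer of words attaining it.
def combinerAltLoop (st : Int × List String) (w : String) : Int × List String :=
  if PySem.Str.len w > st.1 then (PySem.Str.len w, [w])
  else if PySem.Str.len w = st.1 then (st.1, st.2 ++ [w])
  else st
def combiner_alt (letter : String) (words : List String) : List (String × String) :=
  let st := words.foldl combinerAltLoop (0, [])
  st.2.foldl (fun acc w => acc ++ [(letter, w)]) []

-- ===== PRECONDITION & SPEC =====
def Spec_combiner (letter : String) (words : List String) (out : List (String × String)) : Prop := out = combiner_alt letter words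
instance (letter : String) (words : List String) (out : List (String × String)) : Decidable (Spec_combiner letter words out) := by unfold Spec_combiner; infer_instance

-- ===== CLAIM (what is proved, stated in full; the proofs are below) =====
def Claim_equal_combiner : Prop := ∀ (letter : String) (words : List String), Dom_combiner letter words → Spec_combiner letter words (combiner letter words)

-- ===== LEMMAS AND PROOFS =====

-- ===== VERDICT =====
-- the running max is ≥ its start
lemma pvMax_ge (xs : List String) (m : Int) :
    m ≤ xs.foldl (fun a w => if a < (w.length : Int) then (w.length : Int) else a) m := by
  induction xs generalizing m with
  | nil => simp
  | cons w xs ih =>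
    simp only [List.foldl_cons]
    refine le_trans ?_ (ih _)
    split <;> omega

-- invariant of B's single-pass loop: it computes A's max together with the filter by that max
lemma pvLoop_inv (xs : List String) (m : Int) (buf : List String) :
    xs.foldl combinerAltLoop (m, buf) =
      (xs.foldl (fun a w => if a < (w.length : Int) then (w.length : Int) else a) m,
       (if xs.foldl (fun a w => if a < (w.length : Int) then (w.length : Int) else a) m = m
          then buf else [])
         ++ xs.filter (fun w => decide ((w.length : Int) =
              xs.foldl (fun a w => if a < (w.length : Int) then (w.length : Int) else a) m))) := by
  induction xs generalizing m buf with
  | nil => simp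
  | cons w xs ih =>
    simp only [List.foldl_cons, List.filter_cons, combinerAltLoop, PySem.Str.len_eq,
      String.length_toList, gt_iff_lt]
    by_cases h1 : m < (w.length : Int)
    · have hge := pvMax_ge xs (w.length : Int)
      simp only [if_pos h1]
      rw [ih]
      have hne : ¬ (xs.foldl (fun a w => if a < (w.length : Int) then (w.length : Int) else a)
          (w.length : Int) = m) := by omega
      by_cases h2 : (w.length : Int) =
          xs.foldl (fun a w => if a < (w.length : Int) then (w.length : Int) else a) (w.length : Int)
      · simp [hne, ← h2]
        exact fun h => absurd h (by omega)
      · have h2' : ¬ (xs.foldl (fun a w => if a < (w.length : Int) then (w.length : Int) else a)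
            (w.length : Int) = (w.length : Int)) := fun h => h2 h.symm
        simp [hne, h2', h2]
    · have hge := pvMax_ge xs m
      simp only [if_neg h1]
      by_cases h2 : (w.length : Int) = m
      · simp only [if_pos h2]
        rw [ih]
        by_cases h3 : xs.foldl (fun a w => if a < (w.length : Int) then (w.length : Int) else a) m = m
        · simp [h3, h2, List.append_assoc]
        · have hh : ¬ ((w.length : Int) =
              xs.foldl (fun a w => if a < (w.length : Int) then (w.length : Int) else a) m) := by
            omega
          simp [h3, hh]
      · simp only [if_neg h2]
        rw [ih]
        have hh : ¬ ((w.length : Int) =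
            xs.foldl (fun a w => if a < (w.length : Int) then (w.length : Int) else a) m) := by
          omega
        simp [hh]

-- A's second loop is map-of-filter
lemma pvFoldl_if_app (letter : String) (M : Int) (xs : List String) (acc : List (String × String)) :
    xs.foldl (fun acc w => if (w.length : Int) = M then acc ++ [(letter, w)] else acc) acc
      = acc ++ (xs.filter (fun w => decide ((w.length : Int) = M))).map (fun w => (letter, w)) := by
  induction xs generalizing acc with
  | nil => simp
  | cons w xs ih =>
    simp only [List.foldl_cons, List.filter_cons]
    by_cases h : (w.length : Int) = M
    · rw [if_pos h, ih]; simp [h]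
    · rw [if_neg h, ih]; simp [h]

-- B's emit loop is a map
lemma pvFoldl_app (letter : String) (xs : List String) (acc : List (String × String)) :
    xs.foldl (fun acc w => acc ++ [(letter, w)]) acc = acc ++ xs.map (fun w => (letter, w)) := by
  induction xs generalizing acc with
  | nil => simp
  | cons w xs ih => simp [ih]

-- ===== VERDICT =====
theorem combiner_spec : Claim_equal_combiner := by
  intro letter words _
  unfold Spec_combiner combiner combiner_alt
  simp only [PySem.Str.len_eq, String.length_toList, gt_iff_lt]
  rw [pvLoop_inv, pvFoldl_if_app, pvFoldl_app]
  split <;> simp
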